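-- pv_equiv track=rewrite | github.com/antmonge/amomentintime | server/proto15.py | grid
-- ===== SOURCE A (Python) =====
-- from math import pi, sqrt, ceil
--
-- def grid(iterations, width, height, random, gridsize):
--   smallx1 = []
--   smallx2 = []
--   smally1 = []
--   smally2 = []
--   randomness = int(ceil(random/10))
--   if randomness in (1,2,3,4):
--     sqiterations = 10
--   elif randomness in (8,9,10):
--     sqiterations = 1
--   elif randomness in (5,6,7):
--     sqiterations = 4
--   else:
--     sqiterations = 2
--   smallxoffset = int(width/sqiterations*2)
--   smallyoffset = int(height/sqiterations*2)
--   smalltempx1 = 0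
--   smalltempy1 = 0
--   smalltempx2 = smallxoffset
--   smalltempy2 = smallyoffset
--   imultip = 1
--   jmultip = 1
--
--   for i in range(0, sqiterations):
--     for j in range(0, sqiterations):
--       smallx1.append(smalltempx1)
--       smally1.append(smalltempy1)
--       smallx2.append(smalltempx2)
--       smally2.append(smalltempy2)
--       if (smalltempx2 + smallxoffset) > width * 2 and jmultip == 1:
--         smalltempx1 = width * 2 - smallxoffset
--         smalltempx2 = width * 2
--         jmultip = -1
--       elif (smalltempx1 - smallxoffset) < 0 and jmultip == -1:
--         smalltempx1 = 0
--         smalltempx2 = smallxoffset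
--         jmultip = 1
--       else:
--         smalltempx1 = smalltempx1 + smallxoffset * jmultip
--         smalltempx2 = smalltempx2 + smallxoffset * jmultip
--     if (smalltempy2 + smallyoffset) > height * 2 and imultip == 1:
--       smalltempy1 = height * 2 - smallyoffset
--       smalltempy2 = height * 2
--       imultip = -1
--     elif (smalltempy1 - smallyoffset) < 0 and imultip == -1:
--       smalltempy1 = 0
--       smalltempy2 = smallyoffset
--       imultip = 1
--     else:
--       smalltempy1 = smalltempy1 + smallyoffset * imultip
--       smalltempy2 = smalltempy2 + smallyoffset * imultip
--     x1 = smallx1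
--     x2 = smallx2
--     y1 = smally1
--     y2 = smally2
--     xoffset = smallxoffset
--     yoffset = smallyoffset
--
--   return x1, x2, y1, y2, xoffset, yoffset
-- ===== SOURCE B (Python) =====
-- from math import ceil
--
-- def _bounce(bound2, off, count):
--     # one-dimensional bouncing interval generator
--     pairs = []
--     t1, t2, m = 0, off, 1
--     for _ in range(count):
--         pairs.append((t1, t2))
--         if t2 + off > bound2 and m == 1:
--             t1, t2, m = bound2 - off, bound2, -1
--         elif t1 - off < 0 and m == -1:
--             t1, t2, m = 0, off, 1
--         else:
--             t1, t2 = t1 + off * m, t2 + off * m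
--     return pairs
--
-- def grid(iterations, width, height, random, gridsize):
--     randomness = int(ceil(random/10))
--     if randomness in (1, 2, 3, 4):
--         sq = 10
--     elif randomness in (8, 9, 10):
--         sq = 1
--     elif randomness in (5, 6, 7):
--         sq = 4
--     else:
--         sq = 2
--     xoff = int(width/sq*2)
--     yoff = int(height/sq*2)
--     xpairs = _bounce(width * 2, xoff, sq * sq)
--     ypairs = _bounce(height * 2, yoff, sq)
--     x1 = [p[0] for p in xpairs]
--     x2 = [p[1] for p in xpairs]
--     y1 = [p[0] for p in ypairs for _ in range(sq)]
--     y2 = [p[1] for p in ypairs for _ in range(sq)]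
--     return x1, x2, y1, y2, xoff, yoff
-- ===== Notes on version B (the rewrite author's own statement) =====
-- stated objective: simpler
-- what changed: Replaces A's interleaved nested 2-D loop over ten pieces of mutable state by a single 1-D bounce-pair generator used twice (x run of sq*sq steps, y run of sq steps with each pair repeated sq times) plus unzipping.
import Mathlib
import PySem

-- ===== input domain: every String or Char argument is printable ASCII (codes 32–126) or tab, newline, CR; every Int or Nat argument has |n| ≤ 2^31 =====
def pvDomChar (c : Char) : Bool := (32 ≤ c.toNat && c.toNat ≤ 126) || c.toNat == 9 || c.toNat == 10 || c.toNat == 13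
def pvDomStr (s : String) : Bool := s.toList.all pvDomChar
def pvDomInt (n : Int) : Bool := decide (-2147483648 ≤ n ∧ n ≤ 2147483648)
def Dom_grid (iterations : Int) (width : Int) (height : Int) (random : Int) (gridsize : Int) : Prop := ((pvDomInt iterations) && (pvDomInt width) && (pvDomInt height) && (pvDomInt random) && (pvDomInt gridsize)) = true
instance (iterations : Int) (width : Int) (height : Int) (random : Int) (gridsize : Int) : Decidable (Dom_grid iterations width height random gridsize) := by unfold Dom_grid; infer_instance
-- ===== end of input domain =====

-- B replaces A's interleaved 2-D nested loop over ten pieces of mutable state by a single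
-- 1-D "bounce" pair generator used twice (x run of sq² steps; y run of sq steps, each pair
-- repeated sq times), which is a simpler decomposition of the same output.

-- ===== PORT A =====
-- int(ceil(random/10)) : exact on |random| ≤ 2^31 (float error cannot cross an integer), = -((-random)//10)
def pvCeil10 (r : Int) : Int := -(PySem.Int.floordiv (-r) 10)

-- int(width/sq*2) : float division by sq ∈ {1,2,4,10} then *2 then int() truncation; exact on
-- |width| ≤ 2^31 (checked against CPython), equals truncated division (width*2) tdiv sq.
def pvOffset (w sq : Int) : Int := Int.tdiv (w * 2) sq

-- inner `for j in range(0, sqiterations)` loop of A, state = (x1, x2, y1, y2, tx1, tx2, jm)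
def gridInnerA (w2 xoff ty1 ty2 : Int) :
    Nat → List Int × List Int × List Int × List Int × Int × Int × Int →
          List Int × List Int × List Int × List Int × Int × Int × Int
  | 0, st => st
  | Nat.succ n, (x1, x2, y1, y2, tx1, tx2, jm) =>
    let x1 := x1 ++ [tx1]
    let y1 := y1 ++ [ty1]
    let x2 := x2 ++ [tx2]
    let y2 := y2 ++ [ty2]
    if tx2 + xoff > w2 ∧ jm = 1 then
      gridInnerA w2 xoff ty1 ty2 n (x1, x2, y1, y2, w2 - xoff, w2, -1)
    else if tx1 - xoff < 0 ∧ jm = -1 then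
      gridInnerA w2 xoff ty1 ty2 n (x1, x2, y1, y2, 0, xoff, 1)
    else
      gridInnerA w2 xoff ty1 ty2 n (x1, x2, y1, y2, tx1 + xoff * jm, tx2 + xoff * jm, jm)

-- outer `for i in range(0, sqiterations)` loop of A, extra state = (ty1, ty2, im)
def gridOuterA (w2 h2 xoff yoff : Int) (sqn : Nat) :
    Nat → (List Int × List Int × List Int × List Int × Int × Int × Int) × Int × Int × Int →
          (List Int × List Int × List Int × List Int × Int × Int × Int) × Int × Int × Int
  | 0, st => st
  | Nat.succ n, (ist, ty1, ty2, im) =>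
    let ist := gridInnerA w2 xoff ty1 ty2 sqn ist
    if ty2 + yoff > h2 ∧ im = 1 then
      gridOuterA w2 h2 xoff yoff sqn n (ist, h2 - yoff, h2, -1)
    else if ty1 - yoff < 0 ∧ im = -1 then
      gridOuterA w2 h2 xoff yoff sqn n (ist, 0, yoff, 1)
    else
      gridOuterA w2 h2 xoff yoff sqn n (ist, ty1 + yoff * im, ty2 + yoff * im, im)

-- A's `x1 = smallx1` etc. inside the loop alias the very lists that are returned, so the
-- returned lists are the final accumulated lists (the outer loop runs ≥ 1 time: sq ≥ 1).
def grid (iterations : Int) (width : Int) (height : Int) (random : Int) (gridsize : Int) : List Int × List Int × List Int × List Int × Int × Int :=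
  let randomness := pvCeil10 random
  let sq : Int :=
    if randomness = 1 ∨ randomness = 2 ∨ randomness = 3 ∨ randomness = 4 then 10
    else if randomness = 8 ∨ randomness = 9 ∨ randomness = 10 then 1
    else if randomness = 5 ∨ randomness = 6 ∨ randomness = 7 then 4
    else 2
  let xoff := pvOffset width sq
  let yoff := pvOffset height sq
  let sqn := sq.toNat
  let st := gridOuterA (width * 2) (height * 2) xoff yoff sqn sqn
              (([], [], [], [], 0, xoff, 1), 0, yoff, 1)
  (st.1.1, st.1.2.1, st.1.2.2.1, st.1.2.2.2.1, xoff, yoff)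

-- ===== PORT B =====
-- one step of the 1-D bounce state machine, state = (t1, t2, m)
def bounceStep (b2 off : Int) (s : Int × Int × Int) : Int × Int × Int :=
  if s.2.1 + off > b2 ∧ s.2.2 = 1 then (b2 - off, b2, -1)
  else if s.1 - off < 0 ∧ s.2.2 = -1 then (0, off, 1)
  else (s.1 + off * s.2.2, s.2.1 + off * s.2.2, s.2.2)

-- the `_bounce` helper of Source B: emit the current (t1, t2) pair, then step
def bounce (b2 off : Int) : Nat → Int × Int × Int → List (Int × Int)
  | 0, _ => []
  | Nat.succ n, s => (s.1, s.2.1) :: bounce b2 off n (bounceStep b2 off s)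

def grid_alt (iterations : Int) (width : Int) (height : Int) (random : Int) (gridsize : Int) : List Int × List Int × List Int × List Int × Int × Int :=
  let randomness := pvCeil10 random
  let sq : Int :=
    if randomness = 1 ∨ randomness = 2 ∨ randomness = 3 ∨ randomness = 4 then 10
    else if randomness = 8 ∨ randomness = 9 ∨ randomness = 10 then 1
    else if randomness = 5 ∨ randomness = 6 ∨ randomness = 7 then 4
    else 2
  let xoff := pvOffset width sq
  let yoff := pvOffset height sq
  let sqn := sq.toNat
  let xpairs := bounce (width * 2) xoff (sqn * sqn) (0, xoff, 1)
  let ypairs := bounce (height * 2) yoff sqn (0, yoff, 1)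
  (xpairs.map Prod.fst, xpairs.map Prod.snd,
   ypairs.flatMap (fun p => List.replicate sqn p.1),
   ypairs.flatMap (fun p => List.replicate sqn p.2),
   xoff, yoff)

-- ===== PRECONDITION & SPEC =====
def Spec_grid (iterations : Int) (width : Int) (height : Int) (random : Int) (gridsize : Int) (out : List Int × List Int × List Int × List Int × Int × Int) : Prop := out = grid_alt iterations width height random gridsize
instance (iterations : Int) (width : Int) (height : Int) (random : Int) (gridsize : Int) (out : List Int × List Int × List Int × List Int × Int × Int) : Decidable (Spec_grid iterations width height random gridsize out) := by unfold Spec_grid; infer_instance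

-- ===== CLAIM (what is proved, stated in full; the proofs are below) =====
def Claim_equal_grid : Prop := ∀ (iterations : Int) (width : Int) (height : Int) (random : Int) (gridsize : Int), Dom_grid iterations width height random gridsize → Spec_grid iterations width height random gridsize (grid iterations width height random gridsize)

-- ===== LEMMAS AND PROOFS =====

-- A's inner loop = one bounce run for x plus replicated current y pair
theorem gridInnerA_eq (w2 xoff ty1 ty2 : Int) :
    ∀ (n : Nat) (x1 x2 y1 y2 : List Int) (a b c : Int),
      gridInnerA w2 xoff ty1 ty2 n (x1, x2, y1, y2, a, b, c)
      = (x1 ++ (bounce w2 xoff n (a, b, c)).map Prod.fst,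
         x2 ++ (bounce w2 xoff n (a, b, c)).map Prod.snd,
         y1 ++ List.replicate n ty1,
         y2 ++ List.replicate n ty2,
         ((bounceStep w2 xoff)^[n] (a, b, c)).1,
         ((bounceStep w2 xoff)^[n] (a, b, c)).2.1,
         ((bounceStep w2 xoff)^[n] (a, b, c)).2.2) := by
  intro n
  induction n with
  | zero => intro x1 x2 y1 y2 a b c; simp [gridInnerA, bounce]
  | succ n ih =>
    intro x1 x2 y1 y2 a b c
    simp only [gridInnerA, bounce, bounceStep, Function.iterate_succ_apply, List.map_cons,
      List.replicate_succ]
    split_ifs with h1 h2 <;>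
      · rw [ih]; simp [List.append_assoc]

-- splitting a bounce run
theorem bounce_add (b2 off : Int) :
    ∀ (m n : Nat) (s : Int × Int × Int),
      bounce b2 off (m + n) s = bounce b2 off m s ++ bounce b2 off n ((bounceStep b2 off)^[m] s) := by
  intro m
  induction m with
  | zero => intro n s; simp [bounce]
  | succ m ih =>
    intro n s
    have : m + 1 + n = (m + n) + 1 := by omega
    rw [this]
    simp only [bounce, Function.iterate_succ_apply, List.cons_append]
    rw [ih]

-- A's outer loop = x bounce of k·sq steps plus y bounce of k steps with each pair repeated sq times
theorem gridOuterA_eq (w2 h2 xoff yoff : Int) (sqn : Nat) :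
    ∀ (k : Nat) (x1 x2 y1 y2 : List Int) (ax bx cx a b c : Int),
      gridOuterA w2 h2 xoff yoff sqn k
        ((x1, x2, y1, y2, ax, bx, cx), a, b, c)
      = ((x1 ++ (bounce w2 xoff (k * sqn) (ax, bx, cx)).map Prod.fst,
          x2 ++ (bounce w2 xoff (k * sqn) (ax, bx, cx)).map Prod.snd,
          y1 ++ (bounce h2 yoff k (a, b, c)).flatMap (fun p => List.replicate sqn p.1),
          y2 ++ (bounce h2 yoff k (a, b, c)).flatMap (fun p => List.replicate sqn p.2),
          ((bounceStep w2 xoff)^[k * sqn] (ax, bx, cx)).1,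
          ((bounceStep w2 xoff)^[k * sqn] (ax, bx, cx)).2.1,
          ((bounceStep w2 xoff)^[k * sqn] (ax, bx, cx)).2.2),
         ((bounceStep h2 yoff)^[k] (a, b, c)).1,
         ((bounceStep h2 yoff)^[k] (a, b, c)).2.1,
         ((bounceStep h2 yoff)^[k] (a, b, c)).2.2) := by
  intro k
  induction k with
  | zero => intro x1 x2 y1 y2 ax bx cx a b c; simp [gridOuterA, bounce]
  | succ k ih =>
    intro x1 x2 y1 y2 ax bx cx a b c
    have hsplit : (k + 1) * sqn = sqn + k * sqn := by ring
    rw [hsplit, bounce_add _ _ _ _ (ax, bx, cx)]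
    simp only [gridOuterA, gridInnerA_eq, bounce, bounceStep, Function.iterate_succ_apply,
      List.flatMap_cons, Function.iterate_add_apply]
    split_ifs with h1 h2 <;>
      · rw [ih]
        simp [List.append_assoc, ← Function.iterate_add_apply, Nat.add_comm]

-- ===== VERDICT (by name: the statement is the Claim_ definition above) =====
theorem grid_spec : Claim_equal_grid := by
  intro iterations width height random gridsize _
  show _ = _
  unfold grid grid_alt
  simp only []
  rw [gridOuterA_eq]
  simp
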